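-- pv_equiv track=rewrite | github.com/Turmarr/traffic-simulator | src/city.py | link_crosspoints
-- ===== SOURCE A (Python) =====
-- def link_crosspoints(crosspoints, startpoints, building, size):
--     points = {}
--     for i in crosspoints:
--         point = {'startpoint': [], 'crosspoint': []}
--
--         # +x direction
--         j = 1
--         flag = False
--         while True:
--             if i[0] + j == size[0] or flag:
--                 break
--             if (i[0] + j, i[1]) in building:
--                 break
--             for x in crosspoints:
--                 if (i[0] + j, i[1]) == x:
--                     point['crosspoint'].append(x)
--                     flag = True
--                     break
--             if flag:
--                 continue
--             for x in startpoints: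
--                 if (i[0] + j, i[1]) == x:
--                     point['startpoint'].append(x)
--                     flag = True
--                     break
--             if flag:
--                 continue
--             j += 1
--         # +y direction
--         j = 1
--         flag = False
--         while True:
--             if i[1] + j == size[1] or flag:
--                 break
--             if (i[0], i[1] + j) in building:
--                 break
--             for x in crosspoints:
--                 if (i[0], i[1] + j) == x:
--                     point['crosspoint'].append(x)
--                     flag = True
--                     break
--             if flag:
--                 continue
--             for x in startpoints:
--                 if (i[0], i[1] + j) == x:
--                     point['startpoint'].append(x)
--                     flag = True
--                     break
--             if flag:
--                 continue
--             j += 1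
--         # -x direction
--         j = 1
--         flag = False
--         while True:
--             if i[0] - j < 0 or flag:
--                 break
--             if (i[0] - j, i[1]) in building:
--                 break
--             for x in crosspoints:
--                 if (i[0] - j, i[1]) == x:
--                     point['crosspoint'].append(x)
--                     flag = True
--                     break
--             if flag:
--                 continue
--             for x in startpoints:
--                 if (i[0] - j, i[1]) == x:
--                     point['startpoint'].append(x)
--                     flag = True
--                     break
--             if flag:
--                 continue
--             j += 1
--         # -y direction
--         j = 1
--         flag = False
--         while True:
--             if i[1] - j < 0 or flag:
--                 break
--             if (i[0], i[1] - j) in building: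
--                 break
--             for x in crosspoints:
--                 if (i[0], i[1] - j) == x:
--                     point['crosspoint'].append(x)
--                     flag = True
--                     break
--             if flag:
--                 continue
--             for x in startpoints:
--                 if (i[0], i[1] - j) == x:
--                     point['startpoint'].append(x)
--                     flag = True
--                     break
--             if flag:
--                 continue
--             j += 1
--         points[i] = point
--     return points
-- ===== SOURCE B (Python) =====
-- def link_crosspoints(crosspoints, startpoints, building, size):
--     # Classify every occupied cell once (building beats crosspoint beats startpoint),
--     # then for each crosspoint pick the nearest occupied cell per direction by min/max.
--     kind = {}
--     for p in startpoints:
--         kind[p] = 's'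
--     for p in crosspoints:
--         kind[p] = 'c'
--     for p in building:
--         kind[p] = 'b'
--     cells = list(kind)
--     sx, sy = size
--     points = {}
--     for (cx, cy) in crosspoints:
--         point = {'startpoint': [], 'crosspoint': []}
--         right = [x for (x, y) in cells if y == cy and cx < x < sx]
--         up    = [y for (x, y) in cells if x == cx and cy < y < sy]
--         left  = [x for (x, y) in cells if y == cy and 0 <= x < cx]
--         down  = [y for (x, y) in cells if x == cx and 0 <= y < cy]
--         for cell in ((min(right), cy) if right else None,
--                      (cx, min(up)) if up else None,
--                      (max(left), cy) if left else None,
--                      (cx, max(down)) if down else None):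
--             if cell is not None:
--                 k = kind[cell]
--                 if k == 'c':
--                     point['crosspoint'].append(cell)
--                 elif k == 's':
--                     point['startpoint'].append(cell)
--         points[(cx, cy)] = point
--     return points
-- ===== Notes on version B (the rewrite author's own statement) =====
-- stated objective: faster
-- what changed: B builds one priority classification dict of all occupied cells and, per crosspoint and direction, takes the nearest occupied cell of the row/column inside the grid by min/max, instead of A's cell-by-cell walk that rescans all three lists at every visited cell; Pre_ restricts to crosspoints strictly inside the grid (the natural domain), since past the boundary A's exact-equality bound check is skipped and A either never terminates or links to cells beyond the grid.
import Mathlib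
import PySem

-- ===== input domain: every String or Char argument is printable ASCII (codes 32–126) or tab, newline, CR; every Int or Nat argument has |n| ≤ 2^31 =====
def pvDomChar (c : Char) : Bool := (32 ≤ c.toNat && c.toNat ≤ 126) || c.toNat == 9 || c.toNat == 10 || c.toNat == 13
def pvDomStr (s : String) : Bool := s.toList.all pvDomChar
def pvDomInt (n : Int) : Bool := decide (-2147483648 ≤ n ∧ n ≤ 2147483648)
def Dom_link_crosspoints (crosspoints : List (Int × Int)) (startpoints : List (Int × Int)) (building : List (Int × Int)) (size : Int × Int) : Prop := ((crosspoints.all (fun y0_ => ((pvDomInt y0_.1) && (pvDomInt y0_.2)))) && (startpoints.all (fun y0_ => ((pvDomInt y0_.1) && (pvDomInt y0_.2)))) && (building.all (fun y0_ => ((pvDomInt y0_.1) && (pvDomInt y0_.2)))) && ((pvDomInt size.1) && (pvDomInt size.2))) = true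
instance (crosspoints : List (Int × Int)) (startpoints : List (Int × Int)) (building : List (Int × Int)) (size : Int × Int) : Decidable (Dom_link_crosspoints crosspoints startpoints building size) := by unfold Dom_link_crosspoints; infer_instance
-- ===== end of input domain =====

-- B replaces A's cell-by-cell walk (which rescans all three lists at every visited cell) by one
-- classification dict plus a min/max over the occupied cells of the row/column per direction (objective: faster).

-- ===== PORT A =====
-- A's four identical while-loops are one parameterised walk (cell/atBound select the
-- direction); the fuel only makes Python's unbounded `while True` total in Lean — under
-- Pre_ it is never exhausted (outside Pre_ the Python loop may never terminate).
def pvFuel (crosspoints : List (Int × Int)) (startpoints : List (Int × Int)) (building : List (Int × Int)) (size : Int × Int) (i : Int × Int) : Nat :=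
  ((building ++ crosspoints ++ startpoints).map (fun p => p.1.natAbs + p.2.natAbs)).sum
    + size.1.natAbs + size.2.natAbs + i.1.natAbs + i.2.natAbs + 2

def pvWalkA (cps sps bld : List (Int × Int)) (cell : Int → Int × Int) (atBound : Int → Bool) : Nat → Int → Option (Bool × (Int × Int))
  | 0, _ => none
  | fuel+1, j =>
    if atBound j then none
    else if bld.contains (cell j) then none
    else match cps.find? (fun x => x == cell j) with
      | some x => some (true, x)
      | none =>
        match sps.find? (fun x => x == cell j) with
        | some x => some (false, x)
        | none => pvWalkA cps sps bld cell atBound fuel (j+1)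

-- point = {'startpoint': l1, 'crosspoint': l2} kept as the pair (l1, l2); a direction's
-- effect on it (append to 'crosspoint', append to 'startpoint', or nothing) is pvAddHit.
def pvAddHit (pt : List (Int × Int) × List (Int × Int)) : Option (Bool × (Int × Int)) → List (Int × Int) × List (Int × Int)
  | none => pt
  | some (true, c) => (pt.1, pt.2 ++ [c])
  | some (false, c) => (pt.1 ++ [c], pt.2)

def pvPointA (cps sps bld : List (Int × Int)) (size i : Int × Int) : List (String × List (Int × Int)) :=
  let F := pvFuel cps sps bld size i
  let p1 := pvAddHit ([], []) (pvWalkA cps sps bld (fun j => (i.1 + j, i.2)) (fun j => i.1 + j == size.1) F 1)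
  let p2 := pvAddHit p1 (pvWalkA cps sps bld (fun j => (i.1, i.2 + j)) (fun j => i.2 + j == size.2) F 1)
  let p3 := pvAddHit p2 (pvWalkA cps sps bld (fun j => (i.1 - j, i.2)) (fun j => decide (i.1 - j < 0)) F 1)
  let p4 := pvAddHit p3 (pvWalkA cps sps bld (fun j => (i.1, i.2 - j)) (fun j => decide (i.2 - j < 0)) F 1)
  [("startpoint", p4.1), ("crosspoint", p4.2)]

def link_crosspoints (crosspoints : List (Int × Int)) (startpoints : List (Int × Int)) (building : List (Int × Int)) (size : Int × Int) : List (Int × Int × List (String × List (Int × Int))) :=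
  ((crosspoints.foldl (fun d i => d.insert i (pvPointA crosspoints startpoints building size i)) PySem.Dict.empty).items).map
    (fun p => (p.1.1, p.1.2, p.2))

-- ===== PORT B =====
def pvKind (cps sps bld : List (Int × Int)) : PySem.Dict (Int × Int) String :=
  bld.foldl (fun d p => d.insert p "b")
    (cps.foldl (fun d p => d.insert p "c")
      (sps.foldl (fun d p => d.insert p "s") PySem.Dict.empty))

-- body of B's `for cell in (...)` loop
def pvStepB (kind : PySem.Dict (Int × Int) String) (pt : List (Int × Int) × List (Int × Int)) (c? : Option (Int × Int)) : List (Int × Int) × List (Int × Int) :=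
  match c? with
  | none => pt
  | some c =>
    let k := kind.getD c ""
    if k = "c" then (pt.1, pt.2 ++ [c])
    else if k = "s" then (pt.1 ++ [c], pt.2)
    else pt

def pvPointB (kind : PySem.Dict (Int × Int) String) (size i : Int × Int) : List (String × List (Int × Int)) :=
  let cells := kind.keys
  let cx := i.1; let cy := i.2; let sx := size.1; let sy := size.2
  let right := cells.filterMap (fun c => if c.2 = cy ∧ cx < c.1 ∧ c.1 < sx then some c.1 else none)
  let up    := cells.filterMap (fun c => if c.1 = cx ∧ cy < c.2 ∧ c.2 < sy then some c.2 else none)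
  let left  := cells.filterMap (fun c => if c.2 = cy ∧ 0 ≤ c.1 ∧ c.1 < cx then some c.1 else none)
  let down  := cells.filterMap (fun c => if c.1 = cx ∧ 0 ≤ c.2 ∧ c.2 < cy then some c.2 else none)
  let cands : List (Option (Int × Int)) :=
    [ (PySem.List.min? right (fun x => x)).map (fun x => (x, cy)),
      (PySem.List.min? up (fun x => x)).map (fun y => (cx, y)),
      (PySem.List.max? left (fun x => x)).map (fun x => (x, cy)),
      (PySem.List.max? down (fun x => x)).map (fun y => (cx, y)) ]
  let pt := cands.foldl (pvStepB kind) (([], []) : List (Int × Int) × List (Int × Int))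
  [("startpoint", pt.1), ("crosspoint", pt.2)]

def link_crosspoints_alt (crosspoints : List (Int × Int)) (startpoints : List (Int × Int)) (building : List (Int × Int)) (size : Int × Int) : List (Int × Int × List (String × List (Int × Int))) :=
  let kind := pvKind crosspoints startpoints building
  ((crosspoints.foldl (fun d i => d.insert i (pvPointB kind size i)) PySem.Dict.empty).items).map
    (fun p => (p.1.1, p.1.2, p.2))

-- ===== PRECONDITION & SPEC =====
-- Pre_ restricts to the natural domain: every crosspoint strictly inside the grid in +x
-- and +y. On a crosspoint on or past the boundary A's exact-equality bound check
-- (`i[0] + j == size[0]`) is skipped, so A either never terminates or links to cells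
-- beyond the grid boundary, outside the simulated city.
def Pre_link_crosspoints (crosspoints : List (Int × Int)) (startpoints : List (Int × Int)) (building : List (Int × Int)) (size : Int × Int) : Prop :=
  ∀ i ∈ crosspoints, i.1 < size.1 ∧ i.2 < size.2
instance (crosspoints : List (Int × Int)) (startpoints : List (Int × Int)) (building : List (Int × Int)) (size : Int × Int) : Decidable (Pre_link_crosspoints crosspoints startpoints building size) := by unfold Pre_link_crosspoints; infer_instance

def pvWitness_link_crosspoints : (List (Int × Int)) × (List (Int × Int)) × (List (Int × Int)) × (Int × Int) :=
  ([(0, 0), (1, 0)], [(0, 2)], [(3, 3)], (4, 4))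

def Spec_link_crosspoints (crosspoints : List (Int × Int)) (startpoints : List (Int × Int)) (building : List (Int × Int)) (size : Int × Int) (out : List (Int × Int × List (String × List (Int × Int)))) : Prop := out = link_crosspoints_alt crosspoints startpoints building size
instance (crosspoints : List (Int × Int)) (startpoints : List (Int × Int)) (building : List (Int × Int)) (size : Int × Int) (out : List (Int × Int × List (String × List (Int × Int)))) : Decidable (Spec_link_crosspoints crosspoints startpoints building size out) := by
  unfold Spec_link_crosspoints
  haveI : DecidableEq (Int × Int × List (String × List (Int × Int))) := fun a b => instDecidableEqProd a b
  infer_instance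

-- ===== CLAIM (what is proved, stated in full; the proofs are below) =====
def Claim_equal_link_crosspoints : Prop := ∀ (crosspoints : List (Int × Int)) (startpoints : List (Int × Int)) (building : List (Int × Int)) (size : Int × Int), Dom_link_crosspoints crosspoints startpoints building size → Pre_link_crosspoints crosspoints startpoints building size → Spec_link_crosspoints crosspoints startpoints building size (link_crosspoints crosspoints startpoints building size)

-- ===== LEMMAS AND PROOFS =====

theorem find_beq_eq (l : List (Int × Int)) (c : Int × Int) :
    l.find? (fun x => x == c) = if c ∈ l then some c else none := by
  induction l with
  | nil => simp
  | cons h t ih =>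
    by_cases hc : h = c
    · subst hc; simp [List.find?]
    · have hb : (h == c) = false := by simp [hc]
      have hc' : ¬ c = h := fun h' => hc h'.symm
      simp [List.find?, hb, ih, hc']

theorem get?_foldl_insert_const {κ ν : Type} [BEq κ] [LawfulBEq κ] (l : List κ) (v : ν)
    (d : PySem.Dict κ ν) (k : κ) :
    (l.foldl (fun d p => d.insert p v) d).get? k = if k ∈ l then some v else d.get? k := by
  induction l generalizing d with
  | nil => simp
  | cons h t ih =>
    simp only [List.foldl_cons, ih, List.mem_cons]
    by_cases hk : k ∈ t
    · simp [hk]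
    · by_cases hkh : k = h
      · subst hkh; simp [hk, PySem.Dict.get?_insert_self]
      · simp [hk, hkh, PySem.Dict.get?_insert_of_ne d v hkh]

theorem kind_get? (cps sps bld : List (Int × Int)) (c : Int × Int) :
    (pvKind cps sps bld).get? c =
      if c ∈ bld then some "b" else if c ∈ cps then some "c"
      else if c ∈ sps then some "s" else none := by
  unfold pvKind
  rw [get?_foldl_insert_const, get?_foldl_insert_const, get?_foldl_insert_const]
  split_ifs <;> simp_all

theorem mem_kind_keys (cps sps bld : List (Int × Int)) (c : Int × Int) :
    c ∈ (pvKind cps sps bld).keys ↔ c ∈ bld ++ cps ++ sps := by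
  rw [← not_iff_not, ← PySem.Dict.get?_eq_none_iff_not_mem_keys, kind_get?]
  split_ifs <;> simp_all

-- classification of the agreed-on stopping cell
def pvClassify (cps _sps bld : List (Int × Int)) (c : Int × Int) : Option (Bool × (Int × Int)) :=
  if c ∈ bld then none else if c ∈ cps then some (true, c) else some (false, c)

def pvCand (cps sps bld : List (Int × Int)) (c? : Option (Int × Int)) : Option (Bool × (Int × Int)) :=
  match c? with
  | none => none
  | some c => pvClassify cps sps bld c

theorem walk_eq_of_stop (cps sps bld : List (Int × Int)) (cell : Int → Int × Int)
    (atBound : Int → Bool) (fuel : Nat) (j t : Int)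
    (hjt : j ≤ t) (hfuel : t < j + fuel)
    (hstop : atBound t = true ∨ cell t ∈ bld ++ cps ++ sps)
    (hmin : ∀ u, j ≤ u → u < t → atBound u = false ∧ cell u ∉ bld ++ cps ++ sps) :
    pvWalkA cps sps bld cell atBound fuel j =
      if atBound t then none else pvClassify cps sps bld (cell t) := by
  induction fuel generalizing j with
  | zero => omega
  | succ n ih =>
    rcases eq_or_lt_of_le hjt with heq | hlt
    · subst heq
      simp only [pvWalkA, pvClassify]
      rcases hstop with hb | hm
      · simp [hb]
      · simp only [List.mem_append] at hm
        by_cases hb : atBound j = true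
        · simp [hb]
        · simp only [Bool.not_eq_true] at hb
          simp only [hb, Bool.false_eq_true, if_false]
          by_cases hbl : cell j ∈ bld
          · simp [hbl]
          · have hbl' : bld.contains (cell j) = false := by
              simp [hbl]
            simp only [hbl', Bool.false_eq_true, if_false, find_beq_eq]
            by_cases hcp : cell j ∈ cps
            · simp [hcp, hbl]
            · have hsp : cell j ∈ sps := by tauto
              simp [hcp, hsp, hbl]
    · have h1 := hmin j le_rfl hlt
      have hnb : cell j ∉ bld := fun h => h1.2 (by simp [h])
      have hnc : cell j ∉ cps := fun h => h1.2 (by simp [h])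
      have hns : cell j ∉ sps := fun h => h1.2 (by simp [h])
      have hbl' : bld.contains (cell j) = false := by simp [hnb]
      simp only [pvWalkA, h1.1, Bool.false_eq_true, if_false, find_beq_eq, hbl',
        if_neg hnc, if_neg hns]
      exact ih (j + 1) (by omega) (by omega) (fun u hu hut => hmin u (by omega) hut)

-- membership in the four comprehension lists of B
theorem mem_right_list (cells : List (Int × Int)) (cx cy sx x : Int) :
    x ∈ cells.filterMap (fun c => if c.2 = cy ∧ cx < c.1 ∧ c.1 < sx then some c.1 else none)
      ↔ (x, cy) ∈ cells ∧ cx < x ∧ x < sx := by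
  simp only [List.mem_filterMap]
  constructor
  · rintro ⟨⟨a, b⟩, hc, hf⟩
    split_ifs at hf with h
    · obtain ⟨h1, h2, h3⟩ := h
      simp only [Option.some.injEq] at hf
      subst hf; subst h1
      exact ⟨hc, h2, h3⟩
  · rintro ⟨hc, h2, h3⟩
    exact ⟨(x, cy), hc, by simp [h2, h3]⟩

theorem mem_up_list (cells : List (Int × Int)) (cx cy sy y : Int) :
    y ∈ cells.filterMap (fun c => if c.1 = cx ∧ cy < c.2 ∧ c.2 < sy then some c.2 else none)
      ↔ (cx, y) ∈ cells ∧ cy < y ∧ y < sy := by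
  simp only [List.mem_filterMap]
  constructor
  · rintro ⟨⟨a, b⟩, hc, hf⟩
    split_ifs at hf with h
    · obtain ⟨h1, h2, h3⟩ := h
      simp only [Option.some.injEq] at hf
      subst hf; subst h1
      exact ⟨hc, h2, h3⟩
  · rintro ⟨hc, h2, h3⟩
    exact ⟨(cx, y), hc, by simp [h2, h3]⟩

theorem mem_left_list (cells : List (Int × Int)) (cx cy x : Int) :
    x ∈ cells.filterMap (fun c => if c.2 = cy ∧ 0 ≤ c.1 ∧ c.1 < cx then some c.1 else none)
      ↔ (x, cy) ∈ cells ∧ 0 ≤ x ∧ x < cx := by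
  simp only [List.mem_filterMap]
  constructor
  · rintro ⟨⟨a, b⟩, hc, hf⟩
    split_ifs at hf with h
    · obtain ⟨h1, h2, h3⟩ := h
      simp only [Option.some.injEq] at hf
      subst hf; subst h1
      exact ⟨hc, h2, h3⟩
  · rintro ⟨hc, h2, h3⟩
    exact ⟨(x, cy), hc, by simp [h2, h3]⟩

theorem mem_down_list (cells : List (Int × Int)) (cx cy y : Int) :
    y ∈ cells.filterMap (fun c => if c.1 = cx ∧ 0 ≤ c.2 ∧ c.2 < cy then some c.2 else none)
      ↔ (cx, y) ∈ cells ∧ 0 ≤ y ∧ y < cy := by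
  simp only [List.mem_filterMap]
  constructor
  · rintro ⟨⟨a, b⟩, hc, hf⟩
    split_ifs at hf with h
    · obtain ⟨h1, h2, h3⟩ := h
      simp only [Option.some.injEq] at hf
      subst hf; subst h1
      exact ⟨hc, h2, h3⟩
  · rintro ⟨hc, h2, h3⟩
    exact ⟨(cx, y), hc, by simp [h2, h3]⟩

theorem coord_le_sum {p : Int × Int} {l : List (Int × Int)} (hp : p ∈ l) :
    p.1.natAbs + p.2.natAbs ≤ (l.map (fun q => q.1.natAbs + q.2.natAbs)).sum := by
  exact List.le_sum_of_mem (List.mem_map_of_mem hp)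

-- +x direction
theorem dirx_pos (cps sps bld : List (Int × Int)) (sx sy cx cy : Int) (hsx : cx < sx) :
    pvWalkA cps sps bld (fun j => (cx + j, cy)) (fun j => cx + j == sx) (pvFuel cps sps bld (sx, sy) (cx, cy)) 1
      = pvCand cps sps bld
          ((PySem.List.min? (((pvKind cps sps bld).keys).filterMap
              (fun c => if c.2 = cy ∧ cx < c.1 ∧ c.1 < sx then some c.1 else none)) (fun x => x)).map
            (fun x => (x, cy))) := by
  cases hm : PySem.List.min? (((pvKind cps sps bld).keys).filterMap
      (fun c => if c.2 = cy ∧ cx < c.1 ∧ c.1 < sx then some c.1 else none)) (fun x => x) with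
  | some x0 =>
    have hx0 := (mem_right_list _ cx cy sx x0).1 (PySem.List.min?_mem hm)
    obtain ⟨hcells, hgt, hwin⟩ := hx0
    have hS : (x0, cy) ∈ bld ++ cps ++ sps := (mem_kind_keys cps sps bld _).1 hcells
    have hsum := coord_le_sum hS
    rw [walk_eq_of_stop cps sps bld _ _ _ 1 (x0 - cx) (by omega)
      (by unfold pvFuel; simp only []; omega)
      (by
        right
        have : cx + (x0 - cx) = x0 := by ring
        simpa [this] using hS)
      (by
        intro u hu hut
        constructor
        · simp only [beq_eq_false_iff_ne, ne_eq]
          omega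
        · intro hmem
          have hcl : (cx + u) ∈ (((pvKind cps sps bld).keys).filterMap
              (fun c => if c.2 = cy ∧ cx < c.1 ∧ c.1 < sx then some c.1 else none)) := by
            rw [mem_right_list]
            exact ⟨(mem_kind_keys cps sps bld _).2 hmem, by omega, by omega⟩
          have := PySem.List.min?_isMin hm _ hcl
          simp only at this
          omega)]
    have hx : cx + (x0 - cx) = x0 := by ring
    rw [hx]
    have hbnd : (x0 == sx) = false := by
      simp only [beq_eq_false_iff_ne, ne_eq]
      omega
    rw [hbnd]
    simp [pvCand]
  | none =>
    have hre : ∀ z, z ∉ (((pvKind cps sps bld).keys).filterMap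
        (fun c => if c.2 = cy ∧ cx < c.1 ∧ c.1 < sx then some c.1 else none)) := by
      intro z hz
      rw [PySem.List.min?_eq_none_iff] at hm
      simp [hm] at hz
    rw [walk_eq_of_stop cps sps bld _ _ _ 1 (sx - cx) (by omega)
      (by unfold pvFuel; simp only []; omega)
      (by
        left
        simp only [beq_iff_eq]
        omega)
      (by
        intro u hu hut
        constructor
        · simp only [beq_eq_false_iff_ne, ne_eq]; omega
        · intro hmem
          exact hre (cx + u) (by
            rw [mem_right_list]
            exact ⟨(mem_kind_keys cps sps bld _).2 hmem, by omega, by omega⟩))]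
    have hx : cx + (sx - cx) = sx := by ring
    rw [hx]
    simp [pvCand]

-- +y direction
theorem diry_pos (cps sps bld : List (Int × Int)) (sx sy cx cy : Int) (hsy : cy < sy) :
    pvWalkA cps sps bld (fun j => (cx, cy + j)) (fun j => cy + j == sy) (pvFuel cps sps bld (sx, sy) (cx, cy)) 1
      = pvCand cps sps bld
          ((PySem.List.min? (((pvKind cps sps bld).keys).filterMap
              (fun c => if c.1 = cx ∧ cy < c.2 ∧ c.2 < sy then some c.2 else none)) (fun x => x)).map
            (fun y => (cx, y))) := by
  cases hm : PySem.List.min? (((pvKind cps sps bld).keys).filterMap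
      (fun c => if c.1 = cx ∧ cy < c.2 ∧ c.2 < sy then some c.2 else none)) (fun x => x) with
  | some y0 =>
    have hx0 := (mem_up_list _ cx cy sy y0).1 (PySem.List.min?_mem hm)
    obtain ⟨hcells, hgt, hwin⟩ := hx0
    have hS : (cx, y0) ∈ bld ++ cps ++ sps := (mem_kind_keys cps sps bld _).1 hcells
    have hsum := coord_le_sum hS
    rw [walk_eq_of_stop cps sps bld _ _ _ 1 (y0 - cy) (by omega)
      (by unfold pvFuel; simp only []; omega)
      (by
        right
        have : cy + (y0 - cy) = y0 := by ring
        simpa [this] using hS)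
      (by
        intro u hu hut
        constructor
        · simp only [beq_eq_false_iff_ne, ne_eq]
          omega
        · intro hmem
          have hcl : (cy + u) ∈ (((pvKind cps sps bld).keys).filterMap
              (fun c => if c.1 = cx ∧ cy < c.2 ∧ c.2 < sy then some c.2 else none)) := by
            rw [mem_up_list]
            exact ⟨(mem_kind_keys cps sps bld _).2 hmem, by omega, by omega⟩
          have := PySem.List.min?_isMin hm _ hcl
          simp only at this
          omega)]
    have hx : cy + (y0 - cy) = y0 := by ring
    rw [hx]
    have hbnd : (y0 == sy) = false := by
      simp only [beq_eq_false_iff_ne, ne_eq]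
      omega
    rw [hbnd]
    simp [pvCand]
  | none =>
    have hre : ∀ z, z ∉ (((pvKind cps sps bld).keys).filterMap
        (fun c => if c.1 = cx ∧ cy < c.2 ∧ c.2 < sy then some c.2 else none)) := by
      intro z hz
      rw [PySem.List.min?_eq_none_iff] at hm
      simp [hm] at hz
    rw [walk_eq_of_stop cps sps bld _ _ _ 1 (sy - cy) (by omega)
      (by unfold pvFuel; simp only []; omega)
      (by
        left
        simp only [beq_iff_eq]
        omega)
      (by
        intro u hu hut
        constructor
        · simp only [beq_eq_false_iff_ne, ne_eq]; omega
        · intro hmem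
          exact hre (cy + u) (by
            rw [mem_up_list]
            exact ⟨(mem_kind_keys cps sps bld _).2 hmem, by omega, by omega⟩))]
    have hx : cy + (sy - cy) = sy := by ring
    rw [hx]
    simp [pvCand]

-- -x direction
theorem dirx_neg (cps sps bld : List (Int × Int)) (sx sy cx cy : Int) :
    pvWalkA cps sps bld (fun j => (cx - j, cy)) (fun j => decide (cx - j < 0)) (pvFuel cps sps bld (sx, sy) (cx, cy)) 1
      = pvCand cps sps bld
          ((PySem.List.max? (((pvKind cps sps bld).keys).filterMap
              (fun c => if c.2 = cy ∧ 0 ≤ c.1 ∧ c.1 < cx then some c.1 else none)) (fun x => x)).map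
            (fun x => (x, cy))) := by
  cases hm : PySem.List.max? (((pvKind cps sps bld).keys).filterMap
      (fun c => if c.2 = cy ∧ 0 ≤ c.1 ∧ c.1 < cx then some c.1 else none)) (fun x => x) with
  | some x0 =>
    have hx0 := (mem_left_list _ cx cy x0).1 (PySem.List.max?_mem hm)
    obtain ⟨hcells, hge, hlt⟩ := hx0
    have hS : (x0, cy) ∈ bld ++ cps ++ sps := (mem_kind_keys cps sps bld _).1 hcells
    rw [walk_eq_of_stop cps sps bld _ _ _ 1 (cx - x0) (by omega)
      (by unfold pvFuel; simp only []; omega)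
      (by
        right
        have : cx - (cx - x0) = x0 := by ring
        simpa [this] using hS)
      (by
        intro u hu hut
        constructor
        · simp only [decide_eq_false_iff_not, not_lt]; omega
        · intro hmem
          have hcl : (cx - u) ∈ (((pvKind cps sps bld).keys).filterMap
              (fun c => if c.2 = cy ∧ 0 ≤ c.1 ∧ c.1 < cx then some c.1 else none)) := by
            rw [mem_left_list]
            exact ⟨(mem_kind_keys cps sps bld _).2 hmem, by omega, by omega⟩
          have := PySem.List.max?_isMax hm _ hcl
          simp only at this
          omega)]
    have hx : cx - (cx - x0) = x0 := by ring
    rw [hx]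
    have hbnd : (decide (x0 < 0)) = false := by
      simp only [decide_eq_false_iff_not, not_lt]; omega
    rw [hbnd]
    simp [pvCand]
  | none =>
    have hre : ∀ z, z ∉ (((pvKind cps sps bld).keys).filterMap
        (fun c => if c.2 = cy ∧ 0 ≤ c.1 ∧ c.1 < cx then some c.1 else none)) := by
      intro z hz
      rw [PySem.List.max?_eq_none_iff] at hm
      simp [hm] at hz
    by_cases h0 : 0 ≤ cx
    · rw [walk_eq_of_stop cps sps bld _ _ _ 1 (cx + 1) (by omega)
        (by unfold pvFuel; simp only []; omega)
        (by left; simp only [decide_eq_true_eq]; omega)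
        (by
          intro u hu hut
          constructor
          · simp only [decide_eq_false_iff_not, not_lt]; omega
          · intro hmem
            exact hre (cx - u) (by
              rw [mem_left_list]
              exact ⟨(mem_kind_keys cps sps bld _).2 hmem, by omega, by omega⟩))]
      have hb : (decide (cx - (cx + 1) < 0)) = true := by
        simp only [decide_eq_true_eq]; omega
      rw [hb]
      simp [pvCand]
    · rw [walk_eq_of_stop cps sps bld _ _ _ 1 1 (by omega)
        (by unfold pvFuel; simp only []; omega)
        (by left; simp only [decide_eq_true_eq]; omega)
        (by intro u hu hut; omega)]
      have hb : (decide (cx - 1 < 0)) = true := by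
        simp only [decide_eq_true_eq]; omega
      rw [hb]
      simp [pvCand]

-- -y direction
theorem diry_neg (cps sps bld : List (Int × Int)) (sx sy cx cy : Int) :
    pvWalkA cps sps bld (fun j => (cx, cy - j)) (fun j => decide (cy - j < 0)) (pvFuel cps sps bld (sx, sy) (cx, cy)) 1
      = pvCand cps sps bld
          ((PySem.List.max? (((pvKind cps sps bld).keys).filterMap
              (fun c => if c.1 = cx ∧ 0 ≤ c.2 ∧ c.2 < cy then some c.2 else none)) (fun x => x)).map
            (fun y => (cx, y))) := by
  cases hm : PySem.List.max? (((pvKind cps sps bld).keys).filterMap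
      (fun c => if c.1 = cx ∧ 0 ≤ c.2 ∧ c.2 < cy then some c.2 else none)) (fun x => x) with
  | some y0 =>
    have hx0 := (mem_down_list _ cx cy y0).1 (PySem.List.max?_mem hm)
    obtain ⟨hcells, hge, hlt⟩ := hx0
    have hS : (cx, y0) ∈ bld ++ cps ++ sps := (mem_kind_keys cps sps bld _).1 hcells
    rw [walk_eq_of_stop cps sps bld _ _ _ 1 (cy - y0) (by omega)
      (by unfold pvFuel; simp only []; omega)
      (by
        right
        have : cy - (cy - y0) = y0 := by ring
        simpa [this] using hS)
      (by
        intro u hu hut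
        constructor
        · simp only [decide_eq_false_iff_not, not_lt]; omega
        · intro hmem
          have hcl : (cy - u) ∈ (((pvKind cps sps bld).keys).filterMap
              (fun c => if c.1 = cx ∧ 0 ≤ c.2 ∧ c.2 < cy then some c.2 else none)) := by
            rw [mem_down_list]
            exact ⟨(mem_kind_keys cps sps bld _).2 hmem, by omega, by omega⟩
          have := PySem.List.max?_isMax hm _ hcl
          simp only at this
          omega)]
    have hx : cy - (cy - y0) = y0 := by ring
    rw [hx]
    have hbnd : (decide (y0 < 0)) = false := by
      simp only [decide_eq_false_iff_not, not_lt]; omega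
    rw [hbnd]
    simp [pvCand]
  | none =>
    have hre : ∀ z, z ∉ (((pvKind cps sps bld).keys).filterMap
        (fun c => if c.1 = cx ∧ 0 ≤ c.2 ∧ c.2 < cy then some c.2 else none)) := by
      intro z hz
      rw [PySem.List.max?_eq_none_iff] at hm
      simp [hm] at hz
    by_cases h0 : 0 ≤ cy
    · rw [walk_eq_of_stop cps sps bld _ _ _ 1 (cy + 1) (by omega)
        (by unfold pvFuel; simp only []; omega)
        (by left; simp only [decide_eq_true_eq]; omega)
        (by
          intro u hu hut
          constructor
          · simp only [decide_eq_false_iff_not, not_lt]; omega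
          · intro hmem
            exact hre (cy - u) (by
              rw [mem_down_list]
              exact ⟨(mem_kind_keys cps sps bld _).2 hmem, by omega, by omega⟩))]
      have hb : (decide (cy - (cy + 1) < 0)) = true := by
        simp only [decide_eq_true_eq]; omega
      rw [hb]
      simp [pvCand]
    · rw [walk_eq_of_stop cps sps bld _ _ _ 1 1 (by omega)
        (by unfold pvFuel; simp only []; omega)
        (by left; simp only [decide_eq_true_eq]; omega)
        (by intro u hu hut; omega)]
      have hb : (decide (cy - 1 < 0)) = true := by
        simp only [decide_eq_true_eq]; omega
      rw [hb]
      simp [pvCand]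

theorem step_eq (cps sps bld : List (Int × Int)) (pt : List (Int × Int) × List (Int × Int))
    (c? : Option (Int × Int)) (hc : ∀ c, c? = some c → c ∈ bld ++ cps ++ sps) :
    pvAddHit pt (pvCand cps sps bld c?) = pvStepB (pvKind cps sps bld) pt c? := by
  cases c? with
  | none => rfl
  | some c =>
    have hm := hc c rfl
    simp only [List.mem_append] at hm
    simp only [pvCand, pvStepB, PySem.Dict.getD_eq_get?_getD, kind_get?, pvClassify]
    by_cases hb : c ∈ bld
    · simp [hb, pvAddHit]
    · by_cases hcp : c ∈ cps
      · simp [hb, hcp, pvAddHit]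
      · have hsp : c ∈ sps := by tauto
        simp [hb, hcp, hsp, pvAddHit]

theorem point_eq (cps sps bld : List (Int × Int)) (sx sy cx cy : Int)
    (h1 : cx < sx) (h2 : cy < sy) :
    pvPointA cps sps bld (sx, sy) (cx, cy) = pvPointB (pvKind cps sps bld) (sx, sy) (cx, cy) := by
  have hmr : ∀ c, ((PySem.List.min? (((pvKind cps sps bld).keys).filterMap
      (fun c => if c.2 = cy ∧ cx < c.1 ∧ c.1 < sx then some c.1 else none)) (fun x => x)).map
      (fun x => (x, cy))) = some c → c ∈ bld ++ cps ++ sps := by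
    intro c hc
    rcases Option.map_eq_some_iff.1 hc with ⟨x0, hm, rfl⟩
    exact (mem_kind_keys cps sps bld _).1 ((mem_right_list _ cx cy sx x0).1 (PySem.List.min?_mem hm)).1
  have hmu : ∀ c, ((PySem.List.min? (((pvKind cps sps bld).keys).filterMap
      (fun c => if c.1 = cx ∧ cy < c.2 ∧ c.2 < sy then some c.2 else none)) (fun x => x)).map
      (fun y => (cx, y))) = some c → c ∈ bld ++ cps ++ sps := by
    intro c hc
    rcases Option.map_eq_some_iff.1 hc with ⟨y0, hm, rfl⟩
    exact (mem_kind_keys cps sps bld _).1 ((mem_up_list _ cx cy sy y0).1 (PySem.List.min?_mem hm)).1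
  have hml : ∀ c, ((PySem.List.max? (((pvKind cps sps bld).keys).filterMap
      (fun c => if c.2 = cy ∧ 0 ≤ c.1 ∧ c.1 < cx then some c.1 else none)) (fun x => x)).map
      (fun x => (x, cy))) = some c → c ∈ bld ++ cps ++ sps := by
    intro c hc
    rcases Option.map_eq_some_iff.1 hc with ⟨x0, hm, rfl⟩
    exact (mem_kind_keys cps sps bld _).1 ((mem_left_list _ cx cy x0).1 (PySem.List.max?_mem hm)).1
  have hmd : ∀ c, ((PySem.List.max? (((pvKind cps sps bld).keys).filterMap
      (fun c => if c.1 = cx ∧ 0 ≤ c.2 ∧ c.2 < cy then some c.2 else none)) (fun x => x)).map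
      (fun y => (cx, y))) = some c → c ∈ bld ++ cps ++ sps := by
    intro c hc
    rcases Option.map_eq_some_iff.1 hc with ⟨y0, hm, rfl⟩
    exact (mem_kind_keys cps sps bld _).1 ((mem_down_list _ cx cy y0).1 (PySem.List.max?_mem hm)).1
  unfold pvPointA pvPointB
  simp only [List.foldl_cons, List.foldl_nil]
  rw [dirx_pos cps sps bld sx sy cx cy h1, diry_pos cps sps bld sx sy cx cy h2,
    dirx_neg cps sps bld sx sy cx cy, diry_neg cps sps bld sx sy cx cy]
  rw [step_eq cps sps bld _ _ hmr, step_eq cps sps bld _ _ hmu,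
    step_eq cps sps bld _ _ hml, step_eq cps sps bld _ _ hmd]

-- ===== VERDICT (by name: the statement is the Claim_ definition above) =====
theorem link_crosspoints_spec : Claim_equal_link_crosspoints := by
  intro cps sps bld size hdom hpre
  unfold Spec_link_crosspoints link_crosspoints link_crosspoints_alt
  obtain ⟨sx, sy⟩ := size
  have hfold : cps.foldl (fun d i => d.insert i (pvPointA cps sps bld (sx, sy) i)) PySem.Dict.empty
      = cps.foldl (fun d i => d.insert i (pvPointB (pvKind cps sps bld) (sx, sy) i)) PySem.Dict.empty := by
    apply PySem.List.foldl_congr_mem'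
    intro i hi acc
    obtain ⟨cx, cy⟩ := i
    have h := hpre (cx, cy) hi
    rw [point_eq cps sps bld sx sy cx cy h.1 h.2]
  simp only [hfold]
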